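-- pv_equiv track=rewrite | github.com/yogthos/ai-text-humanizer | src/validator/critic.py | _group_similar_issues
-- ===== SOURCE A (Python) =====
-- from typing import Dict, List, Optional, Tuple
--
-- def _group_similar_issues(issues: List[str]) -> Dict[str, List[str]]:
--     """Group similar issues together.
--
--     Args:
--         issues: List of issue strings.
--
--     Returns:
--         Dictionary mapping canonical issue to list of similar variations.
--     """
--     issue_groups: Dict[str, List[str]] = {}
--
--     for issue in issues:
--         issue_lower = issue.lower()
--         matched = False
--
--         # Check if this issue is similar to any existing group
--         for canonical, variations in issue_groups.items():
--             canonical_lower = canonical.lower()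
--
--             # Simple similarity check: shared keywords
--             issue_words = set(issue_lower.split())
--             canonical_words = set(canonical_lower.split())
--
--             # If they share significant words, group them
--             common_words = issue_words & canonical_words
--             # Remove common stop words
--             stop_words = {'the', 'a', 'an', 'and', 'or', 'but', 'to', 'of', 'in', 'on', 'at', 'for', 'with'}
--             common_words -= stop_words
--
--             if len(common_words) >= 2 or (len(common_words) == 1 and len(issue_words) <= 3):
--                 issue_groups[canonical].append(issue)
--                 matched = True
--                 break
--
--         if not matched:
--             # Create new group with this issue as canonical
--             issue_groups[issue] = [issue]
--
--     return issue_groups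
-- ===== SOURCE B (Python) =====
-- from typing import Dict, List
--
--
-- def _group_similar_issues(issues: List[str]) -> Dict[str, List[str]]:
--     """Group similar issues via an inverted keyword index over canonicals.
--
--     Instead of re-splitting and intersecting every existing canonical for every
--     incoming issue, keep an index mapping each non-stopword keyword to the
--     canonicals containing it; an issue tallies shared keywords only over the
--     candidate canonicals its own keywords point at, and joins the earliest
--     created candidate meeting the required number of shared keywords.
--     """
--     stop_words = {'the', 'a', 'an', 'and', 'or', 'but', 'to', 'of', 'in', 'on', 'at', 'for', 'with'}
--     groups = {}  # canonical -> variations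
--     order = {}   # canonical -> creation rank
--     index = {}   # keyword -> canonicals whose word set contains it
--
--     for issue in issues:
--         issue_words = set(issue.lower().split())
--         keywords = issue_words - stop_words
--         need = 1 if len(issue_words) <= 3 else 2
--         counts = {}
--         for w in keywords:
--             for c in index.get(w, []):
--                 counts[c] = counts.get(c, 0) + 1
--         candidates = [c for c, n in counts.items() if n >= need]
--         if candidates:
--             groups[min(candidates, key=lambda c: order[c])].append(issue)
--         else:
--             if issue not in groups:
--                 order[issue] = len(order)
--                 for w in keywords:
--                     index.setdefault(w, []).append(issue)
--             groups[issue] = [issue]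
--
--     return groups
-- ===== Notes on version B (the rewrite author's own statement) =====
-- stated objective: faster
-- what changed: Replaces the per-issue rescan of every existing canonical (re-splitting and intersecting word sets each time) with an inverted keyword->canonical index plus a creation-rank map: each issue tallies shared keywords only over the candidate canonicals its own keywords point at and joins the earliest-created candidate meeting the threshold.
import Mathlib
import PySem

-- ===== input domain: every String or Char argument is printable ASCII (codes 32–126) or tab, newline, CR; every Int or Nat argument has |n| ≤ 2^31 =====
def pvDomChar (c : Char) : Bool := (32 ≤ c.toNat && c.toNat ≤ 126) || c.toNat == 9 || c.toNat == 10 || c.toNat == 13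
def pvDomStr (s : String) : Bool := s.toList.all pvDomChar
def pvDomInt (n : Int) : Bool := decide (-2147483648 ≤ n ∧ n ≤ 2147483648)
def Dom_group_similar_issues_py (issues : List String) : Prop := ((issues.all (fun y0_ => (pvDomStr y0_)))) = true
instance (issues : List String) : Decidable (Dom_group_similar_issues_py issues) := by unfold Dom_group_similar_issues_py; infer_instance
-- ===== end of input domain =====

-- B replaces A's quadratic rescan of every canonical with an inverted keyword->canonical index;
-- equal return values are proved on all inputs (neither version raises; A mutates nothing).

-- the stop-word literal both Pythons share
def pvStop : List String := ["the", "a", "an", "and", "or", "but", "to", "of", "in", "on", "at", "for", "with"]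

-- ===== PORT A =====
-- the inner similarity test of A, for one (issue_lower, canonical) pair
def pvMatchA (issueLower canonical : String) : Bool :=
  let canonicalLower := PySem.Str.lower canonical
  let issueWords : PySem.Set String := PySem.Set.ofList (PySem.Str.split₀ issueLower)
  let canonicalWords : PySem.Set String := PySem.Set.ofList (PySem.Str.split₀ canonicalLower)
  let common := PySem.Set.inter issueWords canonicalWords
  let stopWords : PySem.Set String := PySem.Set.ofList pvStop
  let common2 := PySem.Set.diff common stopWords
  decide (2 ≤ common2.length ∨ (common2.length = 1 ∧ issueWords.length ≤ 3))

-- A's inner 'for canonical, variations in issue_groups.items(): … break': first matching canonical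
def pvFirstMatch (issueLower : String) : List (String × List String) → Option String
  | [] => none
  | (c, _) :: rest => if pvMatchA issueLower c then some c else pvFirstMatch issueLower rest

-- one iteration of A's outer loop
def pvStepA (d : PySem.Dict String (List String)) (issue : String) : PySem.Dict String (List String) :=
  match pvFirstMatch (PySem.Str.lower issue) d.items with
  | some c => d.modify c [] (fun v => v ++ [issue])
  | none => d.insert issue [issue]

def group_similar_issues_py (issues : List String) : List (String × List String) :=
  (issues.foldl pvStepA PySem.Dict.empty).items

-- ===== PORT B =====
def pvWordsB (s : String) : PySem.Set String := PySem.Set.ofList (PySem.Str.split₀ (PySem.Str.lower s))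

-- Source B's 'keywords = issue_words - stop_words'
def pvKwB (s : String) : PySem.Set String := PySem.Set.diff (pvWordsB s) (PySem.Set.ofList pvStop)

-- Source B's 'need = 1 if len(issue_words) <= 3 else 2'
def pvNeed (s : String) : Int := if (pvWordsB s).length ≤ 3 then 1 else 2

-- Source B's tally loop: counts[c] = counts.get(c, 0) + 1 over the postings of each keyword
def pvCounts (index : PySem.Dict String (List String)) (kws : List String) :
    PySem.Dict String Int :=
  kws.foldl (fun cd w => (index.getD w []).foldl (fun cd c => cd.modify c 0 (· + 1)) cd)
    PySem.Dict.empty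

-- Source B's 'candidates = [c for c, n in counts.items() if n >= need]'
def pvCandidates (index : PySem.Dict String (List String)) (kws : List String) (need : Int) :
    List String :=
  ((pvCounts index kws).items.filter (fun p => need ≤ p.2)).map Prod.fst

-- one iteration of B's loop over (groups, order, index).  'order[c]' is ported as
-- 'order.getD c 0': Source B only looks order up at candidates, which are always registered
-- canonicals, so the default is never consulted on any run.
def pvStepB
    (st : PySem.Dict String (List String) × PySem.Dict String Int × PySem.Dict String (List String))
    (issue : String) :
    PySem.Dict String (List String) × PySem.Dict String Int × PySem.Dict String (List String) :=
  let keywords : PySem.Set String := pvKwB issue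
  match PySem.List.min? (pvCandidates st.2.2 keywords (pvNeed issue))
      (fun c => st.2.1.getD c 0) with
  | some c => (st.1.modify c [] (fun v => v ++ [issue]), st.2.1, st.2.2)
  | none =>
      if st.1.contains issue then
        (st.1.insert issue [issue], st.2.1, st.2.2)
      else
        (st.1.insert issue [issue],
         st.2.1.insert issue (st.2.1.size : Int),
         keywords.foldl (fun ix w => ix.modify w [] (fun l => l ++ [issue])) st.2.2)

def group_similar_issues_py_alt (issues : List String) : List (String × List String) :=
  ((issues.foldl pvStepB (PySem.Dict.empty, PySem.Dict.empty, PySem.Dict.empty)).1).items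

-- ===== PRECONDITION & SPEC =====
def Spec_group_similar_issues_py (issues : List String) (out : List (String × List String)) : Prop :=
  out = group_similar_issues_py_alt issues
instance (issues : List String) (out : List (String × List String)) :
    Decidable (Spec_group_similar_issues_py issues out) := by
  unfold Spec_group_similar_issues_py; infer_instance

-- ===== CLAIM (what is proved, stated in full; the proofs are below) =====
def Claim_equal_group_similar_issues_py : Prop :=
  ∀ (issues : List String), Dom_group_similar_issues_py issues →
    Spec_group_similar_issues_py issues (group_similar_issues_py issues)

-- ===== LEMMAS AND PROOFS =====

-- canonical at position gi of an items list
def pvCanonAt (groups : List (String × List String)) (gi : Nat) : String :=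
  (groups.getD gi ("", [])).1

-- the loop invariant tying A's dict to B's (groups, order, index)
def pvInv (d : PySem.Dict String (List String))
    (st : PySem.Dict String (List String) × PySem.Dict String Int ×
      PySem.Dict String (List String)) : Prop :=
  st.1 = d ∧ d.keys.Nodup ∧ st.2.1.keys = d.keys ∧
  (∀ i (h : i < d.keys.length), st.2.1.getD (d.keys[i]) 0 = (i : Int)) ∧
  (∀ w : String, st.2.2.getD w [] = d.keys.filter (fun c => decide (w ∈ pvKwB c)))

-- (b) A's similarity test counted over B's keyword lists
theorem pvMatch_iff (s c : String) :
    pvMatchA (PySem.Str.lower s) c = true ↔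
      pvNeed s ≤ (((pvKwB s).filter (fun w => decide (w ∈ pvKwB c))).length : Int) := by
  have hlists :
      PySem.Set.diff
          (PySem.Set.inter (pvWordsB s) (pvWordsB c)) (PySem.Set.ofList pvStop)
        = (pvKwB s).filter (fun w => decide (w ∈ pvKwB c)) := by
    simp only [pvKwB, PySem.Set.diff, PySem.Set.inter, List.filter_filter]
    apply List.filter_congr
    intro w _
    simp only [PySem.Set.contains_eq_listContains, List.contains_eq_mem, List.mem_filter,
      Bool.not_eq_eq_eq_not, Bool.not_true]
    by_cases h1 : w ∈ pvWordsB c <;> by_cases h2 : w ∈ (PySem.Set.ofList pvStop : List String) <;>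
      simp [h1, h2]
  unfold pvMatchA
  simp only [decide_eq_true_eq]
  rw [show PySem.Set.ofList (PySem.Str.split₀ (PySem.Str.lower c)) = pvWordsB c from rfl,
    show PySem.Set.ofList (PySem.Str.split₀ (PySem.Str.lower s)) = pvWordsB s from rfl, hlists]
  unfold pvNeed
  split_ifs with h3 <;> omega

-- (a) the flattened posting multiset: occurrences of c = shared keywords with canonical c
theorem pvCountL (keys : List String) (index : PySem.Dict String (List String))
    (hnd : keys.Nodup)
    (hIdx : ∀ w : String, index.getD w [] = keys.filter (fun c => decide (w ∈ pvKwB c)))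
    (kws : List String) (c : String) :
    (kws.flatMap (fun w => index.getD w [])).count c
      = if c ∈ keys
          then (kws.filter (fun w => decide (w ∈ pvKwB c))).length
          else 0 := by
  rw [List.count_flatMap]
  have hcount : ∀ w : String, List.count c (index.getD w []) =
      if c ∈ keys ∧ w ∈ pvKwB c then 1 else 0 := by
    intro w
    rw [hIdx w]
    have hndf : (keys.filter (fun c => decide (w ∈ pvKwB c))).Nodup := List.Nodup.filter _ hnd
    by_cases hmem : c ∈ keys.filter (fun c => decide (w ∈ pvKwB c))
    · rw [List.count_eq_one_of_mem hndf hmem]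
      simp only [List.mem_filter, decide_eq_true_eq] at hmem
      simp [hmem.1, hmem.2]
    · rw [List.count_eq_zero_of_not_mem hmem]
      symm
      rw [if_neg]
      intro h
      exact hmem (by simp [List.mem_filter, h.1, h.2])
  by_cases hc : c ∈ keys
  · have hfun : ∀ w : String, List.count c (index.getD w []) =
        if (fun w => decide (w ∈ pvKwB c)) w = true then 1 else 0 := by
      intro w; rw [hcount w]
      by_cases h : w ∈ pvKwB c <;> simp [h, hc]
    simp only [Function.comp_def, hfun]
    rw [PySem.List.sum_map_ite_one_zero_nat (fun w => decide (w ∈ pvKwB c)) kws]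
    simp [hc, List.countP_eq_length_filter]
  · simp only [Function.comp_def, hcount, hc, false_and, if_false]
    simp

-- (c) a canonical is a candidate of B exactly when A's similarity test accepts it
theorem pvCandidates_mem (keys : List String) (index : PySem.Dict String (List String))
    (hnd : keys.Nodup)
    (hIdx : ∀ w : String, index.getD w [] = keys.filter (fun c => decide (w ∈ pvKwB c)))
    (s : String) (c : String) :
    c ∈ pvCandidates index (pvKwB s) (pvNeed s) ↔
      c ∈ keys ∧ pvMatchA (PySem.Str.lower s) c = true := by
  have hco : pvCounts index (pvKwB s)
      = PySem.Dict.counter ((pvKwB s).flatMap (fun w => index.getD w [])) := by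
    unfold pvCounts
    rw [← List.foldl_flatMap, PySem.Dict.counter_eq_foldl]
  set L := (pvKwB s).flatMap (fun w => index.getD w []) with hL
  have hmem : c ∈ pvCandidates index (pvKwB s) (pvNeed s) ↔
      c ∈ PySem.Set.ofList L ∧ pvNeed s ≤ (L.count c : Int) := by
    unfold pvCandidates
    rw [hco, PySem.Dict.items_counter, List.filter_map, List.map_map]
    simp only [List.mem_map, List.mem_filter, Function.comp_def, decide_eq_true_eq]
    constructor
    · rintro ⟨a, ⟨h1, h2⟩, rfl⟩; exact ⟨h1, h2⟩
    · rintro ⟨h1, h2⟩; exact ⟨c, ⟨h1, h2⟩, rfl⟩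
  rw [hmem, PySem.Set.mem_ofList]
  have hcnt := pvCountL keys index hnd hIdx (pvKwB s) c
  have hneed : 1 ≤ pvNeed s := by unfold pvNeed; split_ifs <;> omega
  constructor
  · rintro ⟨hin, hle⟩
    have hpos : 0 < L.count c := List.count_pos_iff.mpr hin
    have hck : c ∈ keys := by
      by_contra hno
      rw [hcnt, if_neg hno] at hpos
      omega
    refine ⟨hck, ?_⟩
    rw [pvMatch_iff]
    rw [hcnt, if_pos hck] at hle
    exact hle
  · rintro ⟨hck, hm⟩
    rw [pvMatch_iff] at hm
    rw [hcnt, if_pos hck]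
    refine ⟨List.count_pos_iff.mp ?_, hm⟩
    rw [hcnt, if_pos hck]
    omega

-- (d) the first matching canonical in A's scan
theorem pvFirstMatch_none_iff (il : String) (groups : List (String × List String)) :
    pvFirstMatch il groups = none ↔ ∀ p ∈ groups, pvMatchA il p.1 = false := by
  induction groups with
  | nil => simp [pvFirstMatch]
  | cons hd tl ih =>
    obtain ⟨c, v⟩ := hd
    by_cases h : pvMatchA il c = true
    · simp [pvFirstMatch, h]
    · simp only [pvFirstMatch, Bool.not_eq_true] at h ⊢
      simp [h, ih]

theorem pvFirstMatch_of_least (il : String) (groups : List (String × List String)) (gi : Nat)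
    (hlt : gi < groups.length) (hm : pvMatchA il (pvCanonAt groups gi) = true)
    (hleast : ∀ j < gi, pvMatchA il (pvCanonAt groups j) = false) :
    pvFirstMatch il groups = some (pvCanonAt groups gi) := by
  induction groups generalizing gi with
  | nil => simp at hlt
  | cons hd tl ih =>
    obtain ⟨c, v⟩ := hd
    cases gi with
    | zero =>
      simp only [pvCanonAt, List.getD_cons_zero] at hm ⊢
      simp [pvFirstMatch, hm]
    | succ n =>
      have h0 : pvMatchA il c = false := by
        have := hleast 0 (Nat.succ_pos n)
        simpa [pvCanonAt] using this
      simp only [pvCanonAt, List.getD_cons_succ] at hm ⊢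
      simp only [pvFirstMatch, h0, Bool.false_eq_true, if_false]
      exact ih n (by simpa using hlt) hm
        (fun j hj => by
          have := hleast (j + 1) (by omega)
          simpa [pvCanonAt] using this)

-- canonical at position i of d.items is the i-th key
theorem pvCanonAt_eq_key (d : PySem.Dict String (List String)) (i : Nat)
    (h : i < d.keys.length) :
    pvCanonAt d.items i = d.keys[i] := by
  unfold pvCanonAt
  simp only [PySem.Dict.keys] at h ⊢
  rw [List.getD_eq_getElem _ _ (by simpa using h)]
  simp [List.getElem_map]

-- the single step preserves the invariant
set_option maxHeartbeats 1000000 in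
theorem pvStep_inv (d : PySem.Dict String (List String))
    (st : PySem.Dict String (List String) × PySem.Dict String Int ×
      PySem.Dict String (List String))
    (s : String) (h : pvInv d st) : pvInv (pvStepA d s) (pvStepB st s) := by
  obtain ⟨h1, h2, h3, h4, h5⟩ := h
  have hitemslen : d.keys.length = d.items.length := by simp [PySem.Dict.keys]
  cases hmin : PySem.List.min? (pvCandidates st.2.2 (pvKwB s) (pvNeed s))
      (fun c => st.2.1.getD c 0) with
  | some c =>
    have hB : pvStepB st s = (st.1.modify c [] (fun v => v ++ [s]), st.2.1, st.2.2) := by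
      simp only [pvStepB, hmin]
    have hcand := (pvCandidates_mem d.keys st.2.2 h2 h5 s c).mp (PySem.List.min?_mem hmin)
    obtain ⟨hck, hmatch⟩ := hcand
    have hleast := PySem.List.min?_isMin hmin
    obtain ⟨i, hi, hieq⟩ := List.mem_iff_getElem.mp hck
    have hnomatch : ∀ j < i, pvMatchA (PySem.Str.lower s) (pvCanonAt d.items j) = false := by
      intro j hj
      by_contra hb
      rw [Bool.not_eq_false] at hb
      rw [pvCanonAt_eq_key d j (by omega)] at hb
      have hjc : d.keys[j] ∈ pvCandidates st.2.2 (pvKwB s) (pvNeed s) :=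
        (pvCandidates_mem d.keys st.2.2 h2 h5 s _).mpr
          ⟨List.mem_iff_getElem.mpr ⟨j, by omega, rfl⟩, hb⟩
      have hle := hleast _ hjc
      rw [h4 j (by omega), ← hieq, h4 i hi] at hle
      omega
    have hfm : pvFirstMatch (PySem.Str.lower s) d.items = some c := by
      have := pvFirstMatch_of_least (PySem.Str.lower s) d.items i (by omega)
        (by rw [pvCanonAt_eq_key d i hi, hieq]; exact hmatch) hnomatch
      rwa [pvCanonAt_eq_key d i hi, hieq] at this
    have hA : pvStepA d s = d.modify c [] (fun v => v ++ [s]) := by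
      simp only [pvStepA, hfm]
    have hcont : d.contains c = true := (PySem.Dict.contains_iff_mem_keys d c).mpr hck
    have hkeq : (pvStepA d s).keys = d.keys := by
      rw [hA, PySem.Dict.keys_modify, PySem.Dict.keys_insert_of_contains d _ hcont]
    refine ⟨?_, ?_, ?_, ?_, ?_⟩
    · rw [hB, hA, h1]
    · rw [hkeq]; exact h2
    · rw [hB, hkeq]; exact h3
    · rw [hB]; rw [hkeq]; exact h4
    · rw [hB]; rw [hkeq]; exact h5
  | none =>
    have hempty : pvCandidates st.2.2 (pvKwB s) (pvNeed s) = [] :=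
      (PySem.List.min?_eq_none_iff _ _).mp hmin
    have hnm : ∀ c ∈ d.keys, pvMatchA (PySem.Str.lower s) c = false := by
      intro c hc
      by_contra hb
      rw [Bool.not_eq_false] at hb
      have : c ∈ pvCandidates st.2.2 (pvKwB s) (pvNeed s) :=
        (pvCandidates_mem d.keys st.2.2 h2 h5 s c).mpr ⟨hc, hb⟩
      rw [hempty] at this
      exact absurd this (List.not_mem_nil)
    have hfm : pvFirstMatch (PySem.Str.lower s) d.items = none := by
      rw [pvFirstMatch_none_iff]
      intro p hp
      exact hnm p.1 (by simp only [PySem.Dict.keys]; exact List.mem_map_of_mem hp)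
    have hA : pvStepA d s = d.insert s [s] := by
      simp only [pvStepA, hfm]
    by_cases hcont : st.1.contains s = true
    · have hB : pvStepB st s = (st.1.insert s [s], st.2.1, st.2.2) := by
        simp only [pvStepB, hmin, hcont, if_true]
      have hdcont : d.contains s = true := by rw [← h1]; exact hcont
      have hkeq : (pvStepA d s).keys = d.keys := by
        rw [hA, PySem.Dict.keys_insert_of_contains d _ hdcont]
      refine ⟨?_, ?_, ?_, ?_, ?_⟩
      · rw [hB, hA, h1]
      · rw [hkeq]; exact h2
      · rw [hB, hkeq]; exact h3
      · rw [hB]; rw [hkeq]; exact h4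
      · rw [hB]; rw [hkeq]; exact h5
    · rw [Bool.not_eq_true] at hcont
      have hB : pvStepB st s
          = (st.1.insert s [s], st.2.1.insert s (st.2.1.size : Int),
             (pvKwB s).foldl (fun ix w => ix.modify w [] (fun l => l ++ [s])) st.2.2) := by
        simp only [pvStepB, hmin, hcont, Bool.false_eq_true, if_false]
      have hdnot : d.contains s = false := by rw [← h1]; exact hcont
      have hsnotmem : s ∉ d.keys := by
        intro hsk
        rw [(PySem.Dict.contains_iff_mem_keys d s).mpr hsk] at hdnot
        exact absurd hdnot (by simp)
      have hkeq : (pvStepA d s).keys = d.keys ++ [s] := by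
        rw [hA, PySem.Dict.keys_insert_of_not_contains d _ hdnot]
      have hordnot : st.2.1.contains s = false := by
        by_contra hbc
        rw [Bool.not_eq_false, PySem.Dict.contains_iff_mem_keys, h3] at hbc
        exact hsnotmem hbc
      have hsize : st.2.1.size = d.keys.length := by
        have : st.2.1.keys.length = d.keys.length := by rw [h3]
        simpa [PySem.Dict.size, PySem.Dict.keys] using this
      refine ⟨?_, ?_, ?_, ?_, ?_⟩
      · rw [hB, hA, h1]
      · rw [hkeq]
        simp only [List.nodup_append]
        refine ⟨h2, List.nodup_singleton _, ?_⟩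
        intro a ha b hb
        rw [List.mem_singleton] at hb
        subst hb
        exact fun hh => hsnotmem (hh ▸ ha)
      · rw [hB, hkeq]
        simp only
        rw [PySem.Dict.keys_insert_of_not_contains _ _ hordnot, h3]
      · rw [hB, hkeq]
        intro i hilt
        simp only
        rw [List.length_append, List.length_singleton] at hilt
        by_cases hil : i < d.keys.length
        · rw [List.getElem_append_left hil]
          have hne : d.keys[i] ≠ s := fun hh => hsnotmem (hh ▸ List.getElem_mem hil)
          rw [PySem.Dict.getD_insert_of_ne _ _ _ hne]
          exact h4 i hil
        · have hieq : i = d.keys.length := by omega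
          subst hieq
          rw [List.getElem_append_right (le_refl _)]
          simp only [Nat.sub_self, List.getElem_singleton]
          rw [PySem.Dict.getD_insert_self, hsize]
          
      · rw [hB, hkeq]
        intro w
        simp only
        have hknd : (pvKwB s).Nodup := by
          unfold pvKwB
          exact PySem.Set.nodup_diff _ _ (PySem.Set.nodup_ofList _)
        have hfold : (pvKwB s).foldl
              (fun ix u => ix.modify u [] (fun l => l ++ [s])) st.2.2
            = ((pvKwB s).map (fun u => (u, s))).foldl
              (fun ix p => ix.modify p.1 [] (fun l => l ++ [p.2])) st.2.2 := by
          rw [List.foldl_map]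
        rw [hfold, PySem.Dict.getD_foldl_modify_append, h5 w]
        have hfil : (((pvKwB s).map (fun u => (u, s))).filter
              (fun p => p.1 == w)).map (fun p => p.2)
            = List.replicate (List.count w (pvKwB s)) s := by
          rw [List.filter_map]
          simp only [Function.comp_def]
          rw [show (fun u => ((u, s).1 == w)) = (fun u => u == w) from rfl,
            List.filter_beq, List.map_map]
          simp [List.map_replicate]
        rw [hfil, List.filter_append]
        have hpart2 : List.replicate (List.count w (pvKwB s)) s
            = [s].filter (fun c => decide (w ∈ pvKwB c)) := by
          by_cases hw : w ∈ pvKwB s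
          · rw [List.count_eq_one_of_mem hknd hw]
            simp [hw]
          · rw [List.count_eq_zero_of_not_mem hw]
            simp [hw]
        rw [hpart2]

-- the whole loop, by induction on the issue list
theorem pvLoop_inv (issues : List String) :
    ∀ (d : PySem.Dict String (List String))
      (st : PySem.Dict String (List String) × PySem.Dict String Int ×
        PySem.Dict String (List String)),
      pvInv d st → pvInv (issues.foldl pvStepA d) (issues.foldl pvStepB st) := by
  induction issues with
  | nil => intro d st hinv; simpa using hinv
  | cons s rest ih =>
    intro d st hinv
    simp only [List.foldl_cons]
    exact ih (pvStepA d s) (pvStepB st s) (pvStep_inv d st s hinv)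

-- ===== VERDICT (by name: the statement is the Claim_ definition above) =====
theorem group_similar_issues_py_spec : Claim_equal_group_similar_issues_py := by
  intro issues _
  unfold Spec_group_similar_issues_py group_similar_issues_py group_similar_issues_py_alt
  have h := pvLoop_inv issues PySem.Dict.empty (PySem.Dict.empty, PySem.Dict.empty, PySem.Dict.empty)
    (by
      refine ⟨rfl, by simp [PySem.Dict.keys, PySem.Dict.empty], rfl, ?_, ?_⟩
      · intro i hi
        simp [PySem.Dict.keys, PySem.Dict.empty] at hi
      · intro w
        simp [PySem.Dict.getD, PySem.Dict.get?, PySem.Dict.keys, PySem.Dict.empty])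
  rw [h.1]
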